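-- pv_equiv track=rewrite | github.com/SaimSiddique1/Computer-Science-Projects | mancala.py | create_mancalas
-- ===== SOURCE A (Python) =====
-- BLOCK_WIDTH = 6
--
-- BLOCK_HEIGHT = 5
--
-- STONES = 'Stones'
--
-- def create_mancalas(player_one_name, player_two_name, player_one_stones, player_two_stones):
--     mancala_a = []
--     mancala_b = []
--     for i in range(2 * BLOCK_HEIGHT):
--         # appended value to the list based on different numbers, specifically their index going down the list
--         if i == 2:
--             mancala_a.append(player_two_name.ljust(BLOCK_WIDTH))
--             mancala_b.append(player_one_name.ljust(BLOCK_WIDTH))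
--         elif i == 6:
--             mancala_a.append(STONES.ljust(BLOCK_WIDTH))
--             mancala_b.append(STONES.ljust(BLOCK_WIDTH))
--         elif i == 7:
--             mancala_a.append(player_two_stones.ljust(BLOCK_WIDTH))
--             mancala_b.append(player_one_stones.ljust(BLOCK_WIDTH))
--         else:
--             mancala_a.append(" " * BLOCK_WIDTH)
--             mancala_b.append(" " * BLOCK_WIDTH)
--     return mancala_a, mancala_b
-- ===== SOURCE B (Python) =====
-- BLOCK_WIDTH = 6
-- BLOCK_HEIGHT = 5
-- STONES = 'Stones'
--
-- def _column(name, stones):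
--     # one display column, built as a concatenation of literal segments
--     blank = " " * BLOCK_WIDTH
--     return ([blank] * 2
--             + [name.ljust(BLOCK_WIDTH)]
--             + [blank] * 3
--             + [STONES.ljust(BLOCK_WIDTH), stones.ljust(BLOCK_WIDTH)]
--             + [blank] * (2 * BLOCK_HEIGHT - 8))
--
-- def create_mancalas(player_one_name, player_two_name, player_one_stones, player_two_stones):
--     return _column(player_two_name, player_two_stones), _column(player_one_name, player_one_stones)
-- ===== Notes on version B (the rewrite author's own statement) =====
-- stated objective: simpler
-- what changed: Removes the dual-list index loop entirely: one helper builds a single column as a concatenation of literal segments (blanks, name, blanks, STONES, stones, blanks) and is applied twice with swapped players.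
import Mathlib
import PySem

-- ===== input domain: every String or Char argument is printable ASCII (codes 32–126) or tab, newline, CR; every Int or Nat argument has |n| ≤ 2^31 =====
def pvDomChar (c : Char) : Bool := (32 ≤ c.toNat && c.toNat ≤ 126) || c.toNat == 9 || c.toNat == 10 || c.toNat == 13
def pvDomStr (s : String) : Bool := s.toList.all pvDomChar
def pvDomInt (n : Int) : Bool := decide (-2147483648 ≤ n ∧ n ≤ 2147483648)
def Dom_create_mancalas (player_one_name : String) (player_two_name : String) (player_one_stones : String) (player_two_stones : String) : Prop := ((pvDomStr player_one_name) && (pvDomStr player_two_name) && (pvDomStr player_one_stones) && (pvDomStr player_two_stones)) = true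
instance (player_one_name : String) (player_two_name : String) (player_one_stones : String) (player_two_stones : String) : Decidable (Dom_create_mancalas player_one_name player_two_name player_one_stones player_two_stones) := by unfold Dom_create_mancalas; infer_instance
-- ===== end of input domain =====

-- ===== PORT A =====
-- B drops the dual-list index loop: one helper builds a column by segment concatenation, applied twice (simpler decomposition; same cost).
-- str.ljust(w) with a space fill, exact: s + " " * max(0, w - len(s))
def pyLjust (s : String) (w : Nat) : String :=
  s ++ String.mk (List.replicate (w - s.toList.length) ' ')

def create_mancalas (player_one_name : String) (player_two_name : String) (player_one_stones : String) (player_two_stones : String) : List String × List String :=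
  -- mancala_a = []; mancala_b = []; for i in range(2*BLOCK_HEIGHT): append per branch
  let p := (PySem.List.pyRange 0 10 1).foldl (fun (st : List String × List String) i =>
    if i = 2 then (st.1 ++ [pyLjust player_two_name 6], st.2 ++ [pyLjust player_one_name 6])
    else if i = 6 then (st.1 ++ [pyLjust "Stones" 6], st.2 ++ [pyLjust "Stones" 6])
    else if i = 7 then (st.1 ++ [pyLjust player_two_stones 6], st.2 ++ [pyLjust player_one_stones 6])
    else (st.1 ++ ["      "], st.2 ++ ["      "])) ([], [])
  (p.1, p.2)

-- ===== PORT B =====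
-- _column(name, stones): one column as a concatenation of literal segments
def column (name : String) (stones : String) : List String :=
  let blank : String := "      "
  List.replicate 2 blank
    ++ [pyLjust name 6]
    ++ List.replicate 3 blank
    ++ [pyLjust "Stones" 6, pyLjust stones 6]
    ++ List.replicate 2 blank

def create_mancalas_alt (player_one_name : String) (player_two_name : String) (player_one_stones : String) (player_two_stones : String) : List String × List String :=
  (column player_two_name player_two_stones, column player_one_name player_one_stones)

-- ===== PRECONDITION & SPEC =====
def Spec_create_mancalas (player_one_name : String) (player_two_name : String) (player_one_stones : String) (player_two_stones : String) (out : List String × List String) : Prop := out = create_mancalas_alt player_one_name player_two_name player_one_stones player_two_stones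
instance (player_one_name : String) (player_two_name : String) (player_one_stones : String) (player_two_stones : String) (out : List String × List String) : Decidable (Spec_create_mancalas player_one_name player_two_name player_one_stones player_two_stones out) := by unfold Spec_create_mancalas; infer_instance

-- ===== CLAIM =====
def Claim_equal_create_mancalas : Prop := ∀ (player_one_name : String) (player_two_name : String) (player_one_stones : String) (player_two_stones : String), Dom_create_mancalas player_one_name player_two_name player_one_stones player_two_stones → Spec_create_mancalas player_one_name player_two_name player_one_stones player_two_stones (create_mancalas player_one_name player_two_name player_one_stones player_two_stones)

-- ===== LEMMAS AND PROOFS =====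

-- ===== VERDICT =====
theorem create_mancalas_spec : Claim_equal_create_mancalas := by
  intro p1 p2 s1 s2 _
  unfold Spec_create_mancalas create_mancalas create_mancalas_alt column
  rfl
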